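-- pv_equiv track=rewrite | github.com/pypi-data/pypi-mirror-290 | packages/abctoolkit/abctoolkit-0.0.4-py3-none-any.whl/abctoolkit/utils.py | extract_metadata_and_parts
-- ===== SOURCE A (Python) =====
-- def extract_metadata_and_tunebody(abc_lines: list):
--     # 分割为 metadata 和 tunebody
--     tunebody_index = None
--     for i, line in enumerate(reversed(abc_lines)):
--         if line.strip() == 'V:1':
--             tunebody_index = len(abc_lines) - 1 - i
--             break
--     if tunebody_index is None:
--         raise Exception('tunebody index not found.')
--
--     metadata_lines = abc_lines[:tunebody_index]
--     tunebody_lines = abc_lines[tunebody_index:]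
--
--     return metadata_lines, tunebody_lines
--
-- def extract_metadata_and_parts(abc_lines: list):
--
--     metadata_lines, tunebody_lines = extract_metadata_and_tunebody(abc_lines)
--
--     part_symbol_list = []
--     part_text_list = []
--
--     last_start_index = None
--     for i, line in enumerate(tunebody_lines):
--         if i == 0:
--             last_start_index = 1
--             part_symbol_list.append(line.strip())
--             continue
--         if line.startswith('V:'):
--             last_end_index = i
--             part_text_list.append(''.join(tunebody_lines[last_start_index:last_end_index]))
--             part_symbol_list.append(line.strip())
--             last_start_index = i + 1
--     part_text_list.append(''.join(tunebody_lines[last_start_index:]))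
--
--     part_text_dict = {}
--     for i in range(len(part_symbol_list)):
--         part_text_dict[part_symbol_list[i]] = part_text_list[i]
--
--     return metadata_lines, part_text_dict
-- ===== SOURCE B (Python) =====
-- def extract_metadata_and_parts(abc_lines: list):
--     # find the last line stripping to 'V:1'
--     idx = None
--     for k in range(len(abc_lines) - 1, -1, -1):
--         if abc_lines[k].strip() == 'V:1':
--             idx = k
--             break
--     if idx is None:
--         raise Exception('tunebody index not found.')
--
--     metadata_lines = abc_lines[:idx]
--     tunebody_lines = abc_lines[idx:]
--
--     # single streaming pass: current symbol + accumulator, dict built incrementally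
--     part_text_dict = {}
--     current_symbol = tunebody_lines[0].strip()
--     current_lines = []
--     for line in tunebody_lines[1:]:
--         if line.startswith('V:'):
--             part_text_dict[current_symbol] = ''.join(current_lines)
--             current_symbol = line.strip()
--             current_lines = []
--         else:
--             current_lines.append(line)
--     part_text_dict[current_symbol] = ''.join(current_lines)
--
--     return metadata_lines, part_text_dict
-- ===== Notes on version B (the rewrite author's own statement) =====
-- stated objective: simpler
-- what changed: Replaces A's parallel symbol/text lists with index bookkeeping, repeated list slicing and a final zip-into-dict loop by one streaming pass that keeps a current symbol and an accumulator and builds the dict incrementally.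
import Mathlib
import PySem

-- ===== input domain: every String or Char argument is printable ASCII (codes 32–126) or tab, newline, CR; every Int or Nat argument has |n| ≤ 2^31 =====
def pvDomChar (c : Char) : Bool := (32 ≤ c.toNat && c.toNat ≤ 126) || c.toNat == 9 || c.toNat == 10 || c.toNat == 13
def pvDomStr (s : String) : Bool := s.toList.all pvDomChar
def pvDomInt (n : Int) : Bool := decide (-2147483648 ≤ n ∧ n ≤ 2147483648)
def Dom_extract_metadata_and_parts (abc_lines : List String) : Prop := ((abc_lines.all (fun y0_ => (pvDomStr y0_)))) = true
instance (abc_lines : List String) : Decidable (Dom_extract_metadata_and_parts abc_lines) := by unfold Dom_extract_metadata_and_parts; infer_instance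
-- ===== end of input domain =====

-- B replaces A's parallel symbol/text lists, slice bookkeeping and final zip-into-dict loop by one
-- streaming pass with a current symbol and an accumulator, building the dict incrementally (objective: simpler).

-- ===== PORT A =====
-- the reversed enumerate scan of extract_metadata_and_tunebody: first i (enumeration index over the
-- reversed list) whose line strips to "V:1", returning n - 1 - i
def pvScanRevA (n : Nat) : List String → Nat → Option Nat
  | [], _ => none
  | l :: rest, i => if PySem.Str.strip l = "V:1" then some (n - 1 - i) else pvScanRevA n rest (i + 1)

-- A's 'for i, line in enumerate(tunebody_lines)' loop, state (part_symbol_list, part_text_list, last_start_index)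
def pvLoopA (tb : List String) : List String → Nat → List String → List String → Nat →
    (List String × List String × Nat)
  | [], _, syms, texts, lastStart => (syms, texts, lastStart)
  | line :: rest, i, syms, texts, lastStart =>
    if i = 0 then pvLoopA tb rest (i + 1) (syms ++ [PySem.Str.strip line]) texts 1
    else if PySem.Str.startswith line "V:" then
      pvLoopA tb rest (i + 1) (syms ++ [PySem.Str.strip line])
        (texts ++ [PySem.Str.join "" (PySem.List.slice tb (some (lastStart : Int)) (some (i : Int)))])
        (i + 1)
    else pvLoopA tb rest (i + 1) syms texts lastStart

def extract_metadata_and_parts (abc_lines : List String) : List String × (List (String × String)) :=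
  match pvScanRevA abc_lines.length abc_lines.reverse 0 with
  | none => ([], [])  -- Python raises 'tunebody index not found.' here; excluded by Pre_
  | some idx =>
    let metadata := PySem.List.slice abc_lines none (some (idx : Int))
    let tb := PySem.List.slice abc_lines (some (idx : Int)) none
    let st := pvLoopA tb tb 0 [] [] 0  -- last_start_index = None initially; the i = 0 branch sets it before any use
    let texts := st.2.1 ++ [PySem.Str.join "" (PySem.List.slice tb (some (st.2.2 : Int)) none)]
    -- 'for i in range(len(part_symbol_list)): part_text_dict[...] = ...'; indices are in range, so getD is exact
    let d := (List.range st.1.length).foldl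
      (fun (d : PySem.Dict String String) i => d.insert (st.1.getD i "") (texts.getD i "")) PySem.Dict.empty
    (metadata, d.items)

-- ===== PORT B =====
-- Source B's downward range search for the last line stripping to "V:1"; argument = current index + 1
def pvFindLastV1 (abc : List String) : Nat → Option Nat
  | 0 => none
  | k + 1 => if PySem.Str.strip (abc.getD k "") = "V:1" then some k else pvFindLastV1 abc k

-- Source B's streaming pass: current symbol, accumulator, dict built incrementally
def pvLoopB : List String → String → List String → PySem.Dict String String → PySem.Dict String String
  | [], sym, acc, d => d.insert sym (PySem.Str.join "" acc)
  | l :: rest, sym, acc, d =>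
    if PySem.Str.startswith l "V:" then
      pvLoopB rest (PySem.Str.strip l) [] (d.insert sym (PySem.Str.join "" acc))
    else pvLoopB rest sym (acc ++ [l]) d

def extract_metadata_and_parts_alt (abc_lines : List String) : List String × (List (String × String)) :=
  match pvFindLastV1 abc_lines abc_lines.length with
  | none => ([], [])  -- Source B raises here; excluded by Pre_
  | some idx =>
    match abc_lines.drop idx with
    | [] => ([], [])  -- unreachable: idx < abc_lines.length
    | t0 :: rest =>
      (abc_lines.take idx, (pvLoopB rest (PySem.Str.strip t0) [] PySem.Dict.empty).items)

-- ===== PRECONDITION & SPEC =====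
-- Pre_ excludes exactly the inputs with no line stripping to "V:1", on which A (and B) raise Exception.
def Pre_extract_metadata_and_parts (abc_lines : List String) : Prop :=
  ∃ l ∈ abc_lines, PySem.Str.strip l = "V:1"
instance (abc_lines : List String) : Decidable (Pre_extract_metadata_and_parts abc_lines) := by
  unfold Pre_extract_metadata_and_parts; infer_instance

def pvWitness_extract_metadata_and_parts : List String := ["X:1", "V:1", "abc|", "V:2", "cde|"]

def Spec_extract_metadata_and_parts (abc_lines : List String) (out : List String × (List (String × String))) : Prop :=
  out = extract_metadata_and_parts_alt abc_lines
instance (abc_lines : List String) (out : List String × (List (String × String))) :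
    Decidable (Spec_extract_metadata_and_parts abc_lines out) := by
  unfold Spec_extract_metadata_and_parts; infer_instance

-- ===== CLAIM =====
def Claim_equal_extract_metadata_and_parts : Prop :=
  ∀ (abc_lines : List String), Dom_extract_metadata_and_parts abc_lines →
    Pre_extract_metadata_and_parts abc_lines →
    Spec_extract_metadata_and_parts abc_lines (extract_metadata_and_parts abc_lines)

-- ===== LEMMAS AND PROOFS =====

-- the segment list both loops produce: (symbol, joined text) pairs in order
def pvSeg : List String → String → List String → List (String × String)
  | [], sym, acc => [(sym, PySem.Str.join "" acc)]
  | l :: ls, sym, acc =>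
    if PySem.Str.startswith l "V:" then
      (sym, PySem.Str.join "" acc) :: pvSeg ls (PySem.Str.strip l) []
    else pvSeg ls sym (acc ++ [l])

theorem pvLoopB_eq_seg : ∀ (ls : List String) (sym : String) (acc : List String)
    (d : PySem.Dict String String),
    pvLoopB ls sym acc d = (pvSeg ls sym acc).foldl (fun d p => d.insert p.1 p.2) d := by
  intro ls
  induction ls with
  | nil => intro sym acc d; simp [pvLoopB, pvSeg]
  | cons l rest ih =>
    intro sym acc d
    simp only [pvLoopB, pvSeg]
    split_ifs <;> simp [ih]

theorem pvFindLastV1_append : ∀ (k : Nat) (abc ys : List String), k ≤ abc.length →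
    pvFindLastV1 (abc ++ ys) k = pvFindLastV1 abc k := by
  intro k
  induction k with
  | zero => intro abc ys _; rfl
  | succ k ih =>
    intro abc ys hk
    simp only [pvFindLastV1]
    rw [List.getD_append _ _ _ _ (by omega), ih abc ys (by omega)]

theorem pvScanRev_eq_find : ∀ (abc : List String) (i : Nat),
    pvScanRevA (i + abc.length) abc.reverse i = pvFindLastV1 abc abc.length := by
  intro abc
  induction abc using List.reverseRecOn with
  | nil => intro i; rfl
  | append_singleton abc x ih =>
    intro i
    simp only [List.reverse_append, List.reverse_singleton, List.singleton_append,
      List.length_append, List.length_cons, List.length_nil, pvScanRevA, pvFindLastV1]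
    rw [List.getD_append_right _ _ _ _ (by omega), pvFindLastV1_append _ _ _ (by omega)]
    simp only [Nat.sub_self, List.getD_cons_zero]
    split_ifs with hs
    · congr 1; omega
    · rw [show i + (abc.length + 0 + 1) = (i + 1) + abc.length by omega, ih (i + 1)]

theorem pvFindLastV1_found : ∀ (k : Nat) (abc : List String) (j : Nat),
    pvFindLastV1 abc k = some j → j < k ∧ PySem.Str.strip (abc.getD j "") = "V:1" := by
  intro k
  induction k with
  | zero => intro abc j h; simp [pvFindLastV1] at h
  | succ k ih =>
    intro abc j h
    simp only [pvFindLastV1] at h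
    split_ifs at h with hs
    · cases h; exact ⟨by omega, hs⟩
    · obtain ⟨h1, h2⟩ := ih abc j h; exact ⟨by omega, h2⟩

theorem pvFindLastV1_none : ∀ (k : Nat) (abc : List String),
    pvFindLastV1 abc k = none → ∀ j < k, ¬ PySem.Str.strip (abc.getD j "") = "V:1" := by
  intro k
  induction k with
  | zero => intro abc _ j hj; omega
  | succ k ih =>
    intro abc h j hj
    simp only [pvFindLastV1] at h
    split_ifs at h with hs
    · rcases Nat.lt_succ_iff_lt_or_eq.mp hj with h' | h'
      · exact ih abc h j h'
      · subst h'; exact hs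

-- main loop invariant: A's loop, with the final slice appended, zips to the segment list
theorem pvLoopA_zip : ∀ (rem tb : List String) (i lastStart : Nat)
    (syms texts : List String) (cursym : String),
    tb.drop i = rem → 1 ≤ i → lastStart ≤ i → syms.length = texts.length →
    ((pvLoopA tb rem i (syms ++ [cursym]) texts lastStart).1.zip
      ((pvLoopA tb rem i (syms ++ [cursym]) texts lastStart).2.1 ++
        [PySem.Str.join "" (PySem.List.slice tb
          (some ((pvLoopA tb rem i (syms ++ [cursym]) texts lastStart).2.2 : Int)) none)])
      = syms.zip texts ++ pvSeg rem cursym ((tb.drop lastStart).take (i - lastStart)))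
    ∧ (pvLoopA tb rem i (syms ++ [cursym]) texts lastStart).1.length
      = (pvLoopA tb rem i (syms ++ [cursym]) texts lastStart).2.1.length + 1 := by
  intro rem
  induction rem with
  | nil =>
    intro tb i lastStart syms texts cursym hdrop hi hls hlen
    simp only [pvLoopA]
    constructor
    · have htake : (tb.drop lastStart).take (i - lastStart) = tb.drop lastStart :=
        List.take_of_length_le (by
          have := List.drop_eq_nil_iff.mp hdrop
          simp only [List.length_drop]; omega)
      rw [PySem.List.slice_from_natCast, htake]
      simp [pvSeg, List.zip_append hlen]
    · simp [hlen]
  | cons l rem' ih =>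
    intro tb i lastStart syms texts cursym hdrop hi hls hlen
    have hdrop' : tb.drop (i + 1) = rem' := by
      rw [← List.drop_drop (j := i) (i := 1), hdrop]; rfl
    have hl : tb[i]? = some l := by rw [← List.head?_drop, hdrop]; rfl
    simp only [pvLoopA, if_neg (by omega : ¬ i = 0)]
    by_cases hv : PySem.Str.startswith l "V:"
    · rw [if_pos hv]
      obtain ⟨hz, hl2⟩ := ih tb (i + 1) (i + 1) (syms ++ [cursym])
        (texts ++ [PySem.Str.join "" (PySem.List.slice tb (some (lastStart : Int)) (some (i : Int)))])
        (PySem.Str.strip l) hdrop' (by omega) (le_refl _) (by simp [hlen])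
      refine ⟨?_, hl2⟩
      rw [hz]
      simp only [Nat.sub_self, List.take_zero, pvSeg, if_pos hv]
      rw [PySem.List.slice_natCast, List.zip_append hlen]
      simp
    · rw [if_neg hv]
      obtain ⟨hz, hl2⟩ := ih tb (i + 1) lastStart syms texts cursym hdrop' (by omega) (by omega) hlen
      refine ⟨?_, hl2⟩
      rw [hz]
      have hpend : (tb.drop lastStart).take (i + 1 - lastStart)
          = (tb.drop lastStart).take (i - lastStart) ++ [l] := by
        rw [show i + 1 - lastStart = (i - lastStart) + 1 by omega, List.take_add_one]
        congr 1
        rw [List.getElem?_drop, show lastStart + (i - lastStart) = i by omega, hl]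
        rfl
      rw [hpend]
      simp only [pvSeg]
      rw [if_neg hv]

theorem range_foldl_insert_eq_zip : ∀ (S T : List String) (d : PySem.Dict String String),
    S.length = T.length →
    (List.range S.length).foldl (fun d i => d.insert (S.getD i "") (T.getD i "")) d
      = (S.zip T).foldl (fun d p => d.insert p.1 p.2) d := by
  intro S
  induction S with
  | nil => intro T d _; rfl
  | cons s S ih =>
    intro T d h
    cases T with
    | nil => simp at h
    | cons t T =>
      simp only [List.length_cons, List.range_succ_eq_map, List.foldl_cons, List.foldl_map,
        List.getD_cons_zero, List.getD_cons_succ, List.zip_cons_cons]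
      exact ih T _ (by simpa using h)

-- ===== VERDICT (by name: the statement is the Claim_ definition above) =====
theorem extract_metadata_and_parts_spec : Claim_equal_extract_metadata_and_parts := by
  intro abc _ hpre
  show extract_metadata_and_parts abc = extract_metadata_and_parts_alt abc
  have hfind : pvScanRevA abc.length abc.reverse 0 = pvFindLastV1 abc abc.length := by
    have := pvScanRev_eq_find abc 0
    simpa using this
  cases hcase : pvFindLastV1 abc abc.length with
  | none =>
    exfalso
    obtain ⟨l, hm, hstrip⟩ := hpre
    obtain ⟨j, hj, hget⟩ := List.mem_iff_getElem.mp hm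
    exact pvFindLastV1_none abc.length abc hcase j hj
      (by rw [List.getD_eq_getElem abc "" hj, hget]; exact hstrip)
  | some idx =>
    obtain ⟨hidx, _⟩ := pvFindLastV1_found abc.length abc idx hcase
    have htb : PySem.List.slice abc (some (idx : Int)) none = abc.drop idx :=
      PySem.List.slice_from_natCast abc idx
    cases heq : abc.drop idx with
    | nil => exfalso; have := List.drop_eq_nil_iff.mp heq; omega
    | cons t0 rest =>
      simp only [extract_metadata_and_parts, extract_metadata_and_parts_alt, hfind, hcase,
        htb, heq, PySem.List.slice_to_natCast]
      -- unfold the first iteration (i = 0) of A's loop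
      have hstep : pvLoopA (t0 :: rest) (t0 :: rest) 0 [] [] 0
          = pvLoopA (t0 :: rest) rest 1 ([] ++ [PySem.Str.strip t0]) [] 1 := by
        simp [pvLoopA]
      rw [hstep]
      obtain ⟨hz, hl2⟩ := pvLoopA_zip rest (t0 :: rest) 1 1 [] [] (PySem.Str.strip t0)
        rfl (le_refl 1) (le_refl 1) rfl
      simp only [List.nil_append, List.zip_nil_left, List.take_zero, List.drop_succ_cons,
        List.drop_zero, Nat.sub_self] at hz
      rw [range_foldl_insert_eq_zip _ _ _ (by
        simp only [List.length_append, List.length_cons, List.length_nil]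
        omega)]
      simp only [List.nil_append]
      rw [hz, pvLoopB_eq_seg]
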